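-- pv_equiv track=rewrite | github.com/szapata0901/Genetic_Sequence_Manager | Proyecto_final.py | comparar_secuencias
-- ===== SOURCE A (Python) =====
-- def comparar_secuencias (secuencia_inicial, secuencia_comparada):
--     secuencia_inicial=list(secuencia_inicial)
--     secuencia_comparada=list(secuencia_comparada)
--     contador=0
--     nucleotidos_iguales=0
--     C,A,U,G,T = 0,0,0,0,0
--     long_secuencia=len(secuencia_inicial)
--     while contador < long_secuencia:
--         base_i= secuencia_inicial[contador]
--         base_c= secuencia_comparada[contador]
--         if base_i== base_c:
--             if base_i == "C":
--                 C = C + 1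
--             elif base_i == "A":
--                 A = A + 1
--             elif base_i == "U":
--                 U = U + 1
--             elif base_i == "G":
--                 G = G + 1
--             elif base_i == "T":
--                 T = T + 1
--             nucleotidos_iguales= nucleotidos_iguales +1
--         else:
--             nucleotidos_iguales= nucleotidos_iguales
--         contador= contador + 1
--
--     porcentaje_similitud=int((nucleotidos_iguales/long_secuencia)*100)
--     return porcentaje_similitud, C, A, U, G, T
-- ===== SOURCE B (Python) =====
-- def comparar_secuencias(secuencia_inicial, secuencia_comparada):
--     secuencia_inicial = list(secuencia_inicial)
--     secuencia_comparada = list(secuencia_comparada)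
--     matched = [secuencia_inicial[i]
--                for i in range(len(secuencia_inicial))
--                if secuencia_inicial[i] == secuencia_comparada[i]]
--     nucleotidos_iguales = len(matched)
--     C = matched.count("C")
--     A = matched.count("A")
--     U = matched.count("U")
--     G = matched.count("G")
--     T = matched.count("T")
--     porcentaje_similitud = int((nucleotidos_iguales / len(secuencia_inicial)) * 100)
--     return porcentaje_similitud, C, A, U, G, T
-- ===== Notes on version B (the rewrite author's own statement) =====
-- stated objective: simpler
-- what changed: Replaces the single while-loop with six hand-threaded accumulators by one filtering pass that builds the list of matched bases, after which the total and the five per-letter counts are read off that list with len/count.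
import Mathlib
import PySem

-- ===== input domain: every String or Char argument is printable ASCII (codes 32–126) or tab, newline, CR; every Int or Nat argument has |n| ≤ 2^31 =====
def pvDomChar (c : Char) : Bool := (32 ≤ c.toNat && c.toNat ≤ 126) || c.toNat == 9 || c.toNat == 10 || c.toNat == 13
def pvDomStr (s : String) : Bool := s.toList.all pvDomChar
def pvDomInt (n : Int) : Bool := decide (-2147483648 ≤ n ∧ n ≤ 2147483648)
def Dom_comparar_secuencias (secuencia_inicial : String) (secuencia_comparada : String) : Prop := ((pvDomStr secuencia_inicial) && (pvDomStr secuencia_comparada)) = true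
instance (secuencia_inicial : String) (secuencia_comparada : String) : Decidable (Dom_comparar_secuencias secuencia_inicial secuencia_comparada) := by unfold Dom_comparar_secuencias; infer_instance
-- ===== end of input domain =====

-- B builds the matched-base list in one filtering pass and reads the six results off it with len/count (objective: simpler).


-- ===== PORT A =====
-- Hand model of IEEE-754 binary64 round-to-nearest-even on a nonnegative rational
-- (exact for the values reached here: no overflow, no subnormals).
def pvRoundDouble (q : ℚ) : ℚ :=
  if q ≤ 0 then 0
  else
    let e : ℤ := Int.log 2 q + 1          -- 2^(e-1) ≤ q < 2^e
    let s : ℚ := q * (2 : ℚ) ^ (53 - e)   -- significand scaled into [2^52, 2^53)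
    let m : ℤ := ⌊s⌋
    let m' : ℤ := if (1 : ℚ)/2 < s - (m : ℚ) ∨ (s - (m : ℚ) = (1 : ℚ)/2 ∧ m % 2 = 1) then m + 1 else m
    (m' : ℚ) * (2 : ℚ) ^ (e - 53)

-- Python's int((n/l)*100) for 0 ≤ n ≤ l, 0 < l: float division rounds, the
-- multiplication by 100 rounds again, int truncates (= floor on a nonnegative value).
def pvIntPct (n l : Int) : Int :=
  ⌊pvRoundDouble (pvRoundDouble ((n : ℚ) / (l : ℚ)) * 100)⌋

-- the while loop of A, fuel = long_secuencia - contador; out-of-range reads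
-- (excluded by Pre_) are modelled with a default ' '
def pvLoopA (s1 s2 : List Char) : Nat → Int → Int → Int → Int → Int → Int → Int → Int × Int × Int × Int × Int × Int
  | 0, _, ni, c, a, u, g, t => (ni, c, a, u, g, t)
  | fuel+1, contador, ni, c, a, u, g, t =>
    let base_i := PySem.List.pyGetD s1 contador ' '
    let base_c := PySem.List.pyGetD s2 contador ' '
    if base_i = base_c then
      if base_i = 'C' then pvLoopA s1 s2 fuel (contador+1) (ni+1) (c+1) a u g t
      else if base_i = 'A' then pvLoopA s1 s2 fuel (contador+1) (ni+1) c (a+1) u g t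
      else if base_i = 'U' then pvLoopA s1 s2 fuel (contador+1) (ni+1) c a (u+1) g t
      else if base_i = 'G' then pvLoopA s1 s2 fuel (contador+1) (ni+1) c a u (g+1) t
      else if base_i = 'T' then pvLoopA s1 s2 fuel (contador+1) (ni+1) c a u g (t+1)
      else pvLoopA s1 s2 fuel (contador+1) (ni+1) c a u g t
    else pvLoopA s1 s2 fuel (contador+1) ni c a u g t

def comparar_secuencias (secuencia_inicial : String) (secuencia_comparada : String) : Int × Int × Int × Int × Int × Int :=
  let s1 := secuencia_inicial.toList
  let s2 := secuencia_comparada.toList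
  let long_secuencia := s1.length
  let r := pvLoopA s1 s2 long_secuencia 0 0 0 0 0 0 0
  (pvIntPct r.1 (long_secuencia : Int), r.2)

-- ===== PORT B =====
def comparar_secuencias_alt (secuencia_inicial : String) (secuencia_comparada : String) : Int × Int × Int × Int × Int × Int :=
  let s1 := secuencia_inicial.toList
  let s2 := secuencia_comparada.toList
  let matched := ((PySem.List.pyRange 0 (s1.length : Int) 1).filter
      (fun i => PySem.List.pyGetD s1 i ' ' = PySem.List.pyGetD s2 i ' ')).map
      (fun i => PySem.List.pyGetD s1 i ' ')
  let nucleotidos_iguales : Int := matched.length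
  (pvIntPct nucleotidos_iguales (s1.length : Int),
   (matched.count 'C' : Int), (matched.count 'A' : Int), (matched.count 'U' : Int),
   (matched.count 'G' : Int), (matched.count 'T' : Int))

-- ===== PRECONDITION & SPEC =====
-- A raises ZeroDivisionError on an empty first sequence and IndexError when the
-- second sequence is shorter than the first; Pre_ excludes exactly those inputs.
def Pre_comparar_secuencias (secuencia_inicial : String) (secuencia_comparada : String) : Prop :=
  secuencia_inicial.toList ≠ [] ∧ secuencia_inicial.toList.length ≤ secuencia_comparada.toList.length
instance (secuencia_inicial : String) (secuencia_comparada : String) : Decidable (Pre_comparar_secuencias secuencia_inicial secuencia_comparada) := by unfold Pre_comparar_secuencias; infer_instance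
def pvWitness_comparar_secuencias : String × String := ("GATC", "GACC")

def Spec_comparar_secuencias (secuencia_inicial : String) (secuencia_comparada : String) (out : Int × Int × Int × Int × Int × Int) : Prop := out = comparar_secuencias_alt secuencia_inicial secuencia_comparada
instance (secuencia_inicial : String) (secuencia_comparada : String) (out : Int × Int × Int × Int × Int × Int) : Decidable (Spec_comparar_secuencias secuencia_inicial secuencia_comparada out) := by unfold Spec_comparar_secuencias; infer_instance

-- ===== CLAIM =====
def Claim_equal_comparar_secuencias : Prop := ∀ (secuencia_inicial : String) (secuencia_comparada : String), Dom_comparar_secuencias secuencia_inicial secuencia_comparada → Pre_comparar_secuencias secuencia_inicial secuencia_comparada → Spec_comparar_secuencias secuencia_inicial secuencia_comparada (comparar_secuencias secuencia_inicial secuencia_comparada)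


-- ===== LEMMAS AND PROOFS =====
-- a matched base at index i (as seen through the total default-' ' read)
def pvMatch (s1 s2 : List Char) (i : Nat) : Option Char :=
  if s1[i]?.getD ' ' = s2[i]?.getD ' ' then some (s1[i]?.getD ' ') else none

theorem pvLoopA_step (s1 s2 : List Char) (fuel c : Nat) (ni C A U G T : Int)
    (h : s1[c]?.getD ' ' = s2[c]?.getD ' ') :
    pvLoopA s1 s2 (fuel+1) (c : Int) ni C A U G T =
      pvLoopA s1 s2 fuel ((c : Int)+1) (ni+1)
        (C + if s1[c]?.getD ' ' = 'C' then 1 else 0)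
        (A + if s1[c]?.getD ' ' = 'A' then 1 else 0)
        (U + if s1[c]?.getD ' ' = 'U' then 1 else 0)
        (G + if s1[c]?.getD ' ' = 'G' then 1 else 0)
        (T + if s1[c]?.getD ' ' = 'T' then 1 else 0) := by
  have hget1 : PySem.List.pyGetD s1 (c : Int) ' ' = s1[c]?.getD ' ' := by
    simp [PySem.List.pyGetD_natCast, List.getD]
  have hget2 : PySem.List.pyGetD s2 (c : Int) ' ' = s2[c]?.getD ' ' := by
    simp [PySem.List.pyGetD_natCast, List.getD]
  rw [pvLoopA]
  simp only [hget1, hget2, if_pos h]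
  by_cases h1 : s1[c]?.getD ' ' = 'C'
  · rw [if_pos h1]; simp [h1]
  rw [if_neg h1]
  by_cases h2 : s1[c]?.getD ' ' = 'A'
  · rw [if_pos h2]; simp [h1, h2]
  rw [if_neg h2]
  by_cases h3 : s1[c]?.getD ' ' = 'U'
  · rw [if_pos h3]; simp [h1, h2, h3]
  rw [if_neg h3]
  by_cases h4 : s1[c]?.getD ' ' = 'G'
  · rw [if_pos h4]; simp [h1, h2, h3, h4]
  rw [if_neg h4]
  by_cases h5 : s1[c]?.getD ' ' = 'T'
  · rw [if_pos h5]; simp [h1, h2, h3, h4, h5]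
  rw [if_neg h5]; simp [h1, h2, h3, h4, h5]

theorem pvLoopA_eq (s1 s2 : List Char) :
    ∀ (k c : Nat) (ni C A U G T : Int),
    pvLoopA s1 s2 k (c : Int) ni C A U G T =
      (ni + (((List.range' c k).filterMap (pvMatch s1 s2)).length : Int),
       C + (((List.range' c k).filterMap (pvMatch s1 s2)).count 'C' : Int),
       A + (((List.range' c k).filterMap (pvMatch s1 s2)).count 'A' : Int),
       U + (((List.range' c k).filterMap (pvMatch s1 s2)).count 'U' : Int),
       G + (((List.range' c k).filterMap (pvMatch s1 s2)).count 'G' : Int),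
       T + (((List.range' c k).filterMap (pvMatch s1 s2)).count 'T' : Int)) := by
  intro k
  induction k with
  | zero => intro c ni C A U G T; simp [pvLoopA]
  | succ k ih =>
    intro c ni C A U G T
    have hcast : ((c : Int) + 1) = ((c + 1 : Nat) : Int) := by push_cast; ring
    rw [List.range'_succ]
    by_cases h : s1[c]?.getD ' ' = s2[c]?.getD ' '
    · have hm : pvMatch s1 s2 c = some (s1[c]?.getD ' ') := by simp [pvMatch, h]
      rw [pvLoopA_step s1 s2 k c ni C A U G T h, hcast, ih, List.filterMap_cons, hm]
      simp only [List.count_cons, List.length_cons, Prod.mk.injEq]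
      refine ⟨by push_cast; ring, ?_, ?_, ?_, ?_, ?_⟩ <;>
        · rcases Decidable.em (s1[c]?.getD ' ' = _) with h' <;> simp [*] <;> push_cast <;> ring
    · have hm : pvMatch s1 s2 c = none := by simp [pvMatch, h]
      have hget1 : PySem.List.pyGetD s1 (c : Int) ' ' = s1[c]?.getD ' ' := by
        simp [PySem.List.pyGetD_natCast, List.getD]
      have hget2 : PySem.List.pyGetD s2 (c : Int) ' ' = s2[c]?.getD ' ' := by
        simp [PySem.List.pyGetD_natCast, List.getD]
      rw [pvLoopA]
      simp only [hget1, hget2, if_neg h]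
      rw [hcast, ih, List.filterMap_cons, hm]

theorem pvMatched_eq (s1 s2 : List Char) (l : List Nat) :
    (((List.map (fun (k : Nat) => (k : Int)) l).filter
        (fun i => PySem.List.pyGetD s1 i ' ' = PySem.List.pyGetD s2 i ' ')).map
        (fun i => PySem.List.pyGetD s1 i ' '))
      = l.filterMap (pvMatch s1 s2) := by
  induction l with
  | nil => simp
  | cons n l ih =>
    have hget1 : PySem.List.pyGetD s1 (n : Int) ' ' = s1[n]?.getD ' ' := by
      simp [PySem.List.pyGetD_natCast, List.getD]
    have hget2 : PySem.List.pyGetD s2 (n : Int) ' ' = s2[n]?.getD ' ' := by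
      simp [PySem.List.pyGetD_natCast, List.getD]
    rw [List.map_cons, List.filter_cons, List.filterMap_cons]
    by_cases h : s1[n]?.getD ' ' = s2[n]?.getD ' ' <;>
      simp only [hget1, hget2, h, decide_true, decide_false, if_true, if_false,
        List.map_cons, pvMatch, ih]
    simp [pvMatch, ih]

theorem comparar_secuencias_eq (secuencia_inicial secuencia_comparada : String) :
    comparar_secuencias secuencia_inicial secuencia_comparada
      = comparar_secuencias_alt secuencia_inicial secuencia_comparada := by
  simp only [comparar_secuencias, comparar_secuencias_alt]
  rw [PySem.List.pyRange_zero_nat, pvMatched_eq]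
  rw [show ((0:Int) = ((0:Nat) : Int)) from rfl, pvLoopA_eq]
  simp [List.range_eq_range']

-- ===== VERDICT =====
theorem comparar_secuencias_spec : Claim_equal_comparar_secuencias := by
  intro si sc _ _
  exact comparar_secuencias_eq si sc
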